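-- pv_equiv track=rewrite | github.com/NK590/CodingTestArchive | WEEK21 - 30/WEEK29 ( 03-13 ~ 03-19 )/[3차] N진수게임 - 김현우.py | solution
-- ===== SOURCE A (Python) =====
-- def convert(n, base):
--     num = "0123456789ABCDEF"
--     q, r = divmod(n, base)
--     return num[r] if q == 0 else convert(q, base) + num[r]
--
-- def solution(n, t, m, p):
--     answer = ''
--     temp = ''
--
--     # temp 스트링에 우선 모든 숫자 때려넣기
--     for i in range(m * t):
--         temp += str(convert(i, n))
--
--     # 자기 순서에 맞는 숫자만 answer에 합쳐 출력
--     while len(answer) < t: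
--         answer += temp[p - 1]
--         p += m
--
--     return answer
-- ===== SOURCE B (Python) =====
-- def solution(n, t, m, p):
--     digits = "0123456789ABCDEF"
--     answer = []
--     pos = 0
--     target = p - 1
--     i = 0
--     while len(answer) < t:
--         if i == 0:
--             ds = [0]
--         else:
--             ds = []
--             x = i
--             while x:
--                 ds.append(x % n)
--                 x //= n
--             ds.reverse()
--         for d in ds:
--             if pos == target and len(answer) < t:
--                 answer.append(digits[d])
--                 target += m
--             pos += 1
--         i += 1
--     return ''.join(answer)
-- ===== Notes on version B (the rewrite author's own statement) =====
-- stated objective: alternative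
-- what changed: A first materialises the full m*t-number digit table as one string and then reads it at the strided indices p-1, p-1+m, ...; B never builds the table: it streams the numbers 0,1,2,... through an iterative divmod digit loop (replacing A's recursive convert), keeps a running position counter and a next-target counter, collects a digit exactly when they meet, and stops as soon as t digits are collected.
-- outside the precondition, e.g. on solution(2, 1, 2, 0): A returns '1', B does not finish within the time limit; on solution(2, 3, 1, 2): A returns '110', B returns '110'; on solution(2, -1, -2, 5): A returns '', B returns ''
import Mathlib
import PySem

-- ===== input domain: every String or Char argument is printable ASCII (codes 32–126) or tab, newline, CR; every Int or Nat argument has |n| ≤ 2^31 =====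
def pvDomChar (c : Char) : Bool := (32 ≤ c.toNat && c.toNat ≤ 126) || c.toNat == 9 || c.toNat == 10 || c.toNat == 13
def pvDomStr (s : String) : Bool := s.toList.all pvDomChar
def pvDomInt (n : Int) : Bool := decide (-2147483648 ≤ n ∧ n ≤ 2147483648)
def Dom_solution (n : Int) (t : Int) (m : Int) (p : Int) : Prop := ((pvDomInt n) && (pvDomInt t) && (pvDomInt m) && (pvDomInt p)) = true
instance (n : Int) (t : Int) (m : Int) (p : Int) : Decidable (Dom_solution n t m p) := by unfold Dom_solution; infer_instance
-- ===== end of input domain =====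

-- B replaces A's build-the-whole-table-then-stride-index structure by one fused streaming pass
-- (generate base-n digits number by number with an iterative divmod loop, keep a position counter,
-- emit a digit whenever the counter hits the next target, stop at t digits); objective: alternative
-- decomposition.  Strings are handled as List Char internally (the PySem representation) and packed
-- at the end.

def pvHexDigits : List Char := "0123456789ABCDEF".toList

-- ===== PORT A =====
def convertA : Nat → Int → Int → List Char
  | 0, _, _ => []
  | fuel+1, nn, base =>
    let q := PySem.Int.floordiv nn base
    let r := PySem.Int.mod nn base
    if q = 0 then [(PySem.List.pyGet? pvHexDigits r).getD ' ']
    else convertA fuel q base ++ [(PySem.List.pyGet? pvHexDigits r).getD ' ']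

-- for i in range(m*t): temp += str(convert(i, n))
def tempA (n m t : Int) : List Char :=
  (PySem.List.pyRange 0 (m*t) 1).foldl (fun acc i => acc ++ convertA (i.toNat+1) i n) []

-- while len(answer) < t: answer += temp[p-1]; p += m   (one char per pass, so t.toNat passes exactly)
def whileA (m t : Int) (temp : List Char) : Nat → Int → List Char → List Char
  | 0, _, ans => ans
  | fuel+1, p, ans =>
    if (ans.length : Int) < t then
      whileA m t temp fuel (p + m) (ans ++ [(PySem.List.pyGet? temp (p-1)).getD ' '])
    else ans

def solution (n : Int) (t : Int) (m : Int) (p : Int) : String :=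
  String.ofList (whileA m t (tempA n m t) t.toNat p [])

-- ===== PORT B =====
-- ds = []; while x: ds.append(x % n); x //= n; then reverse  (fuel: the loop runs at most x.toNat times)
def toBaseLoop : Nat → Int → Int → List Int → List Int
  | 0, _, _, ds => ds
  | fuel+1, x, nn, ds =>
    if x = 0 then ds
    else toBaseLoop fuel (PySem.Int.floordiv x nn) nn (ds ++ [PySem.Int.mod x nn])

def toBase (nn i : Int) : List Int :=
  if i = 0 then [0] else (toBaseLoop (i.toNat+1) i nn []).reverse

-- body of the inner 'for d in ds' loop
def stepB (m t : Int) (st : Int × Int × List Char) (d : Int) : Int × Int × List Char :=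
  if st.1 = st.2.1 ∧ (st.2.2.length : Int) < t then
    (st.1 + 1, st.2.1 + m, st.2.2 ++ [(PySem.List.pyGet? pvHexDigits d).getD ' '])
  else (st.1 + 1, st.2.1, st.2.2)

-- while len(answer) < t: <inner loop over to_base(i, n)>; i += 1
-- (fuel: every pass consumes at least one stream position, so (p + t*m).toNat + 1 passes suffice)
def loopB (n t m : Int) : Nat → Int → Int × Int × List Char → List Char
  | 0, _, st => st.2.2
  | fuel+1, i, st =>
    if (st.2.2.length : Int) < t then
      loopB n t m fuel (i+1) ((toBase n i).foldl (stepB m t) st)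
    else st.2.2

def solution_alt (n : Int) (t : Int) (m : Int) (p : Int) : String :=
  String.ofList (loopB n t m ((p + t*m).toNat + 1) 0 (0, p - 1, []))

-- ===== PRECONDITION & SPEC =====
-- Pre_ admits the problem's own domain (base ≥ 2 with at most 16 distinct digits needed, i.e.
-- n ≤ 16 or every generated number below 16; 1 ≤ p ≤ m; t ≥ 0) plus the whole trivial region
-- t ≤ 0 with m*t ≤ 0 (answer '').  It excludes the inputs where Python A raises (base < 2:
-- ZeroDivisionError/RecursionError; base > 16 reaching a digit ≥ 16 or p outside 1..m: IndexError
-- for most shapes; t < 0 with m < 0: an enormous unused table) together with the accidental-return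
-- corners of those same shapes (p outside 1..m surviving via negative-index wraparound or a
-- longer-than-m*t table, t < 0 with m < 0 returning '' after building the table), where A's value
-- is an artefact of the two-phase build.
def Pre_solution (n : Int) (t : Int) (m : Int) (p : Int) : Prop :=
  (2 ≤ n ∧ 1 ≤ p ∧ p ≤ m ∧ 0 ≤ t ∧ (n ≤ 16 ∨ m * t ≤ 16)) ∨ (t ≤ 0 ∧ m * t ≤ 0)
instance (n : Int) (t : Int) (m : Int) (p : Int) : Decidable (Pre_solution n t m p) := by
  unfold Pre_solution; infer_instance

def pvWitness_solution : Int × Int × Int × Int := (2, 2, 2, 1)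

def Spec_solution (n : Int) (t : Int) (m : Int) (p : Int) (out : String) : Prop := out = solution_alt n t m p
instance (n : Int) (t : Int) (m : Int) (p : Int) (out : String) : Decidable (Spec_solution n t m p out) := by unfold Spec_solution; infer_instance

-- ===== CLAIM (what is proved, stated in full; the proofs are below) =====
def Claim_equal_solution : Prop := ∀ (n : Int) (t : Int) (m : Int) (p : Int), Dom_solution n t m p → Pre_solution n t m p → Spec_solution n t m p (solution n t m p)

-- ===== LEMMAS AND PROOFS =====

-- the common model: base-b digits of k most significant first, their hex characters, and the
-- concatenated digit stream of the numbers 0, 1, …, J-1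
def dchar (d : Nat) : Char := (PySem.List.pyGet? pvHexDigits (d : Int)).getD ' '
def repD (b k : Nat) : List Nat := if k = 0 then [0] else (Nat.digits b k).reverse
def streamD (b J : Nat) : List Nat := (List.range J).flatMap (repD b)

theorem repD_ne_nil (b k : Nat) (_hb : 2 ≤ b) : repD b k ≠ [] := by
  unfold repD
  split
  · simp
  · simp [Nat.digits_ne_nil_iff_ne_zero, *]

theorem streamD_len (b J : Nat) (hb : 2 ≤ b) : J ≤ (streamD b J).length := by
  induction J with
  | zero => simp [streamD]
  | succ j ih =>
    have h1 : streamD b (j+1) = streamD b j ++ repD b j := by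
      simp [streamD, List.range_succ]
    have h2 := repD_ne_nil b j hb
    have : 1 ≤ (repD b j).length := by
      cases h : repD b j with
      | nil => exact absurd h h2
      | cons a l => simp
    rw [h1]; simp only [List.length_append]; omega

theorem streamD_prefix (b J K : Nat) (hb : 2 ≤ b) (h : J ≤ K) (i : Nat) (hi : i < J) :
    (streamD b K).getD i 0 = (streamD b J).getD i 0 := by
  have hsplit : streamD b K = streamD b J ++ ((List.range (K - J)).map (J + ·)).flatMap (repD b) := by
    have : List.range K = List.range J ++ (List.range (K - J)).map (J + ·) := by
      rw [show K = J + (K - J) by omega, List.range_add]; simp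
    simp only [streamD, this, List.flatMap_append]
  have hlen : i < (streamD b J).length := lt_of_lt_of_le hi (streamD_len b J hb)
  rw [hsplit, List.getD, List.getD, List.getElem?_append_left hlen]

theorem convertA_eq (base : Int) (hb : 2 ≤ base) (nn : Int) (h0 : 0 ≤ nn)
    (fuel : Nat) (hf : nn.toNat + 1 ≤ fuel) :
    convertA fuel nn base = (repD base.toNat nn.toNat).map dchar := by
  induction fuel using Nat.strong_induction_on generalizing nn with
  | _ fuel ih =>
  match fuel, hf with
  | f+1, hf =>
    set k := nn.toNat with hk
    set b := base.toNat with hbn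
    have hnn : nn = (k : Int) := by omega
    have hbb : base = (b : Int) := by omega
    have hq : PySem.Int.floordiv nn base = ((k / b : Nat) : Int) := by
      rw [hnn, hbb]; exact PySem.Int.floordiv_natCast k b
    have hr : PySem.Int.mod nn base = ((k % b : Nat) : Int) := by
      rw [hnn, hbb]; exact PySem.Int.mod_natCast k b
    have hb2 : 2 ≤ b := by omega
    show (if PySem.Int.floordiv nn base = 0 then _ else _) = _
    rw [hq, hr]
    by_cases hlt : k < b
    · have hdiv : k / b = 0 := Nat.div_eq_of_lt hlt
      have hmod : k % b = k := Nat.mod_eq_of_lt hlt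
      rw [hdiv]
      simp only [Nat.cast_zero, reduceIte]
      unfold repD
      by_cases hk0 : k = 0
      · simp [dchar, hk0]
      · rw [if_neg hk0, Nat.digits_def' (by omega : 1 < b) (by omega), hdiv, Nat.digits_zero]
        simp only [List.reverse_cons, List.reverse_nil, List.nil_append, List.map_cons,
          List.map_nil, dchar]
    · have hk0 : k ≠ 0 := by omega
      have hqpos : 0 < k / b := Nat.div_pos (by omega) (by omega)
      have hqne : ((k / b : Nat) : Int) ≠ 0 := by exact_mod_cast hqpos.ne'
      rw [if_neg hqne]
      have hlt2 : k / b < k := Nat.div_lt_self (by omega) (by omega)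
      have ihq := ih f (by omega) ((k / b : Nat) : Int) (by positivity) (by simp; omega)
      simp only [Int.toNat_natCast] at ihq
      rw [ihq]
      unfold repD
      rw [if_neg hk0, if_neg (by omega : ¬ k / b = 0)]
      rw [Nat.digits_def' (by omega : 1 < b) (by omega : 0 < k)]
      simp only [List.reverse_cons, List.map_append, List.map_cons, List.map_nil, dchar]

theorem tempA_eq (n m t : Int) (hb : 2 ≤ n) :
    tempA n m t = (streamD n.toNat (m*t).toNat).map dchar := by
  unfold tempA streamD
  rw [PySem.List.foldl_append_eq_flatMap]
  rw [PySem.List.pyRange_one]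
  simp only [List.nil_append, Int.zero_add, sub_zero, List.flatMap_map, List.map_flatMap]
  congr 1
  funext k
  rw [convertA_eq n hb ((k:Int)) (by omega) _ (by simp)]
  simp

theorem toBaseLoop_eq (nn : Int) (hb : 2 ≤ nn) :
    ∀ (fuel : Nat) (x : Int), 0 < x → x.toNat ≤ fuel → ∀ (ds : List Int),
      toBaseLoop fuel x nn ds = ds ++ (Nat.digits nn.toNat x.toNat).map (fun d : Nat => (d : Int)) := by
  intro fuel
  induction fuel using Nat.strong_induction_on with
  | _ fuel ih =>
  intro x h0 hf ds
  obtain ⟨f, rfl⟩ : ∃ f, fuel = f + 1 := ⟨fuel - 1, by omega⟩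
  · set k := x.toNat with hkdef
    have hx : x = (k : Int) := by omega
    set b := nn.toNat with hbdef
    have hb2 : 2 ≤ b := by omega
    have hq : PySem.Int.floordiv x nn = ((k / b : Nat) : Int) := by
      rw [hx, show nn = (b : Int) by omega]; exact PySem.Int.floordiv_natCast _ _
    have hr : PySem.Int.mod x nn = ((k % b : Nat) : Int) := by
      rw [hx, show nn = (b : Int) by omega]; exact PySem.Int.mod_natCast _ _
    show (if x = 0 then ds else toBaseLoop f (PySem.Int.floordiv x nn) nn (ds ++ [PySem.Int.mod x nn])) = _
    rw [if_neg (by omega), hq, hr, Nat.digits_def' (by omega : 1 < b) (by omega : 0 < k)]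
    by_cases hq0 : k / b = 0
    · have hstop : toBaseLoop f ((0:Nat) : Int) nn (ds ++ [((k % b : Nat) : Int)]) = ds ++ [((k % b : Nat) : Int)] := by
        cases f <;> simp [toBaseLoop]
      rw [hq0, hstop]
      simp
    · have hqlt : k / b < k := Nat.div_lt_self (by omega) (by omega)
      rw [ih f (by omega) ((k / b : Nat) : Int) (by exact_mod_cast Nat.pos_of_ne_zero hq0)
            (by simp; omega) _]
      simp only [Int.toNat_natCast, List.map_cons, List.append_assoc, List.cons_append,
        List.nil_append]

theorem toBase_eq (nn : Int) (hb : 2 ≤ nn) (i : Int) (h0 : 0 ≤ i) :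
    toBase nn i = (repD nn.toNat i.toNat).map (fun d : Nat => (d : Int)) := by
  unfold toBase repD
  by_cases hi : i = 0
  · simp [hi]
  · rw [if_neg hi, if_neg (by omega : ¬ i.toNat = 0)]
    rw [toBaseLoop_eq nn hb (i.toNat+1) i (by omega) (by omega) []]
    rw [List.nil_append, List.map_reverse]

theorem whileA_eq (m t : Int) (L : List Char) (p : Int) (hm : 1 ≤ m) (hp : 1 ≤ p) (ht : 0 ≤ t)
    (hlen : ∀ k : Nat, k < t.toNat → (p - 1 + k * m).toNat < L.length) :
    ∀ (f j : Nat), j + f = t.toNat →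
      whileA m t L f (p + j * m) ((List.range j).map (fun k : Nat => L.getD (p - 1 + (k:Int) * m).toNat ' ')) =
      (List.range t.toNat).map (fun k : Nat => L.getD (p - 1 + (k:Int) * m).toNat ' ') := by
  intro f
  induction f with
  | zero => intro j hj; simp only [Nat.add_zero] at hj; rw [hj]; rfl
  | succ f ih =>
    intro j hj
    show (if _ < t then _ else _) = _
    rw [if_pos (by simp only [List.length_map, List.length_range]; omega)]
    have hjm : 0 ≤ (j:Int) * m := mul_nonneg (by positivity) (by omega)
    have hjt : j < t.toNat := by omega
    have hidx := hlen j hjt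
    have hchar : (PySem.List.pyGet? L (p + (j:Int) * m - 1)).getD ' '
        = L.getD (p - 1 + (j:Int) * m).toNat ' ' := by
      rw [show p + (j:Int) * m - 1 = p - 1 + (j:Int) * m by ring]
      rw [PySem.List.pyGet?_of_nonneg L (by linarith)]
      rw [List.getD_eq_getElem?_getD]
    have hstep : p + (j:Int) * m + m = p + ((j+1 : Nat) : Int) * m := by push_cast; ring
    rw [hchar, hstep]
    rw [show (List.range j).map (fun k : Nat => L.getD (p - 1 + (k:Int) * m).toNat ' ')
          ++ [L.getD (p - 1 + (j:Int) * m).toNat ' ']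
        = (List.range (j+1)).map (fun k : Nat => L.getD (p - 1 + (k:Int) * m).toNat ' ') by
      rw [List.range_succ, List.map_append]; rfl]
    exact ih (j+1) (by omega)

theorem stepB_frozen (m t : Int) (l : List Int) :
    ∀ (st : Int × Int × List Char), t ≤ (st.2.2.length : Int) → (l.foldl (stepB m t) st).2.2 = st.2.2 := by
  induction l with
  | nil => intro st h; rfl
  | cons d l ih =>
    intro st h
    show (l.foldl (stepB m t) (stepB m t st d)).2.2 = st.2.2
    have hst : stepB m t st d = (st.1 + 1, st.2.1, st.2.2) := by
      unfold stepB
      rw [if_neg (fun hand => by omega)]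
    rw [hst, ih _ (by simpa using h)]

theorem loopB_eq_fold (n t m : Int) :
    ∀ (fuel : Nat) (i : Int) (st : Int × Int × List Char),
      loopB n t m fuel i st =
      (((List.range fuel).flatMap (fun k : Nat => toBase n (i + k))).foldl (stepB m t) st).2.2 := by
  intro fuel
  induction fuel with
  | zero => intro i st; rfl
  | succ f ih =>
    intro i st
    show (if (st.2.2.length : Int) < t then _ else _) = _
    have hsplit : (List.range (f+1)).flatMap (fun k : Nat => toBase n (i + k))
        = toBase n i ++ (List.range f).flatMap (fun k : Nat => toBase n ((i+1) + k)) := by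
      rw [List.range_succ_eq_map]
      simp only [List.flatMap_cons, List.flatMap_map, Nat.cast_zero, add_zero]
      congr 1
      refine List.flatMap_congr (fun a _ => ?_)
      congr 1
      push_cast
      ring
    by_cases hc : (st.2.2.length : Int) < t
    · rw [if_pos hc, ih (i+1) _, hsplit, List.foldl_append]
    · rw [if_neg hc, hsplit, List.foldl_append]
      have h1 : (List.foldl (stepB m t) st (toBase n i)).2.2 = st.2.2 :=
        stepB_frozen m t _ st (by omega)
      rw [stepB_frozen m t _ _ (by rw [h1]; omega), h1]

theorem foldB_picks (m t p : Int) (hm : 1 ≤ m) (_hp : 1 ≤ p) (ht : 0 ≤ t)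
    (DS : List Nat) (hlen : ∀ k : Nat, k < t.toNat → (p - 1 + k * m).toNat < DS.length) :
    ∀ (n pos a : Nat), DS.length - pos = n → a ≤ t.toNat →
      (a < t.toNat → (pos : Int) ≤ p - 1 + a * m) →
      (((DS.drop pos).map (fun d : Nat => (d : Int))).foldl (stepB m t)
          ((pos : Int), p - 1 + (a : Int) * m,
           (List.range a).map (fun k : Nat => dchar (DS.getD (p - 1 + (k:Int) * m).toNat 0)))).2.2 =
      (List.range t.toNat).map (fun k : Nat => dchar (DS.getD (p - 1 + (k:Int) * m).toNat 0)) := by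
  intro n
  induction n using Nat.strong_induction_on with
  | _ n ih =>
  intro pos a hn ha hnext
  by_cases hpos : pos < DS.length
  case neg =>
    have hdrop : DS.drop pos = [] := List.drop_eq_nil_of_le (by omega)
    have haeq : a = t.toNat := by
      by_contra hne
      have halt : a < t.toNat := by omega
      have h1 := hnext halt
      have h2 := hlen a halt
      omega
    rw [hdrop, haeq]
    rfl
  case pos =>
  have hdrop : DS.drop pos = DS[pos] :: DS.drop (pos+1) := List.drop_eq_getElem_cons hpos
  rw [hdrop]
  simp only [List.map_cons, List.foldl_cons]
  have hanslen : ((List.range a).map (fun k : Nat => dchar (DS.getD (p - 1 + (k:Int) * m).toNat 0))).length = a := by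
    simp
  by_cases hpick : (pos : Int) = p - 1 + (a:Int) * m ∧ a < t.toNat
  · have hstep : stepB m t ((pos : Int), p - 1 + (a : Int) * m,
          (List.range a).map (fun k : Nat => dchar (DS.getD (p - 1 + (k:Int) * m).toNat 0))) ((DS[pos] : Nat) : Int)
        = (((pos+1 : Nat) : Int), p - 1 + ((a+1 : Nat) : Int) * m,
           (List.range (a+1)).map (fun k : Nat => dchar (DS.getD (p - 1 + (k:Int) * m).toNat 0))) := by
      simp only [stepB]
      rw [if_pos ⟨hpick.1, by rw [hanslen]; omega⟩]
      simp only [Prod.mk.injEq]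
      refine ⟨by push_cast; ring, by push_cast; ring, ?_⟩
      rw [List.range_succ, List.map_append]
      congr 1
      have hposnat : pos = (p - 1 + (a:Int) * m).toNat := by omega
      show [(PySem.List.pyGet? pvHexDigits ((DS[pos] : Nat) : Int)).getD ' ']
          = [dchar (DS.getD (p - 1 + ((a:Nat):Int) * m).toNat 0)]
      have hval : DS.getD (p - 1 + ((a:Nat):Int) * m).toNat 0 = DS[pos] := by
        rw [← hposnat, List.getD_eq_getElem?_getD, List.getElem?_eq_getElem hpos, Option.getD_some]
      rw [hval]
      rfl
    rw [hstep]
    exact ih (n-1) (by omega) (pos+1) (a+1) (by omega) (by omega)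
      (fun h => by have h1 := hpick.1; push_cast; linarith)
  · have hstep : stepB m t ((pos : Int), p - 1 + (a : Int) * m,
          (List.range a).map (fun k : Nat => dchar (DS.getD (p - 1 + (k:Int) * m).toNat 0))) ((DS[pos] : Nat) : Int)
        = (((pos+1 : Nat) : Int), p - 1 + ((a:Nat) : Int) * m,
           (List.range a).map (fun k : Nat => dchar (DS.getD (p - 1 + (k:Int) * m).toNat 0))) := by
      simp only [stepB]
      rw [if_neg (by rw [hanslen]; intro hand; exact hpick ⟨hand.1, by omega⟩)]
      simp only [Prod.mk.injEq]
      push_cast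
      simp
    rw [hstep]
    refine ih (n-1) (by omega) (pos+1) a (by omega) ha (fun h => ?_)
    have h3 : (pos : Int) < p - 1 + (a:Int) * m :=
      lt_of_le_of_ne (hnext h) (fun hEq => hpick ⟨hEq, h⟩)
    push_cast
    linarith

theorem both_empty (n t m p : Int) (ht : t ≤ 0) : solution n t m p = solution_alt n t m p := by
  unfold solution solution_alt
  rw [show t.toNat = 0 by omega]
  simp only [loopB, whileA]
  rw [if_neg (by simp; omega)]

theorem main_eq (n t m p : Int) (hn2 : 2 ≤ n) (hp1 : 1 ≤ p) (hpm : p ≤ m) (ht0 : 0 ≤ t) :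
    solution n t m p = solution_alt n t m p := by
  unfold solution solution_alt
  set b := n.toNat with hbdef
  have hb2 : 2 ≤ b := by omega
  set N := (m*t).toNat with hNdef
  set F := (p + t*m).toNat + 1 with hFdef
  have hm1 : 1 ≤ m := by omega
  have hmt0 : 0 ≤ m * t := mul_nonneg (by omega) ht0
  have hcomm : m * t = t * m := mul_comm m t
  have hNF : N ≤ F := by omega
  have hidx : ∀ k : Nat, k < t.toNat → 0 ≤ p - 1 + (k:Int) * m ∧ p - 1 + (k:Int) * m < m * t := by
    intro k hk
    have hk' : (k:Int) ≤ t - 1 := by omega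
    have h1 : (k:Int) * m ≤ (t-1) * m := mul_le_mul_of_nonneg_right hk' (by omega)
    have h2 : 0 ≤ (k:Int) * m := mul_nonneg (by positivity) (by omega)
    have h3 : (t-1) * m = t * m - m := by ring
    constructor
    · omega
    · omega
  -- ===== A side =====
  rw [tempA_eq n m t hn2]
  have hlenL : ∀ k : Nat, k < t.toNat → (p - 1 + (k:Int) * m).toNat < ((streamD b N).map dchar).length := by
    intro k hk
    have h := hidx k hk
    have hlen1 := streamD_len b N hb2
    simp only [List.length_map]
    omega
  have hA := whileA_eq m t ((streamD b N).map dchar) p hm1 hp1 ht0 hlenL t.toNat 0 (by omega)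
  norm_num at hA
  rw [hA]
  -- ===== B side =====
  have hlenDS : ∀ k : Nat, k < t.toNat → (p - 1 + (k:Int) * m).toNat < (streamD b F).length := by
    intro k hk
    have h := hidx k hk
    have := streamD_len b F hb2
    omega
  rw [loopB_eq_fold n t m F 0 (0, p - 1, [])]
  have hseg : (List.range F).flatMap (fun k : Nat => toBase n ((0:Int) + ↑k))
      = (streamD b F).map (fun d : Nat => (d : Int)) := by
    rw [streamD, List.map_flatMap]
    refine List.flatMap_congr (fun k _ => ?_)
    rw [zero_add, toBase_eq n hn2 (k : Int) (by positivity)]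
    rw [Int.toNat_natCast]
  rw [hseg]
  have hB := foldB_picks m t p hm1 hp1 ht0 (streamD b F) hlenDS (streamD b F).length 0 0
    (by omega) (by omega) (by intro _; norm_num; omega)
  norm_num at hB
  rw [hB]
  congr 1
  refine List.map_congr_left (fun k hkmem => ?_)
  have hk := List.mem_range.mp hkmem
  obtain ⟨h0, hlt⟩ := hidx k hk
  have hltN : (p - 1 + (k:Int) * m).toNat < N := by omega
  have hlen1 := streamD_len b N hb2
  have hlN : (p - 1 + (k:Int) * m).toNat < (streamD b N).length := by omega
  have hlF := hlenDS k hk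
  rw [List.getElem?_eq_getElem hlN, List.getElem?_eq_getElem hlF]
  simp only [Option.map_some, Option.getD_some]
  congr 1
  have hpre := streamD_prefix b N F hb2 hNF _ hltN
  rw [List.getD_eq_getElem _ 0 hlF, List.getD_eq_getElem _ 0 hlN] at hpre
  exact hpre.symm

-- ===== VERDICT (by name: the statement is the Claim_ definition above) =====
theorem solution_spec : Claim_equal_solution := by
  intro n t m p hdom hpre
  unfold Spec_solution
  rcases hpre with ⟨hn2, hp1, hpm, ht0, _⟩ | ⟨ht, _⟩
  · exact main_eq n t m p hn2 hp1 hpm ht0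
  · exact both_empty n t m p ht
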